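-- pv_equiv track=rewrite | github.com/machinereading/KAIST-framenet-parser-v0.8 | preprocessor.py | load_tsv
-- ===== SOURCE A (Python) =====
-- def load_tsv(lines):
--     result = []
--     sent = []
--     sent_ids = []
--     for line in lines:
--         line = line.rstrip('\n')
--         if line.startswith('#'):
--             if line[1] == 's':
--                 sent_id = line.split(':')[1]
--                 sent_ids.append(sent_id)
--             pass
--         else:
--             if line != '':
--                 token = line.split('\t')
--                 sent.append(token)
--             else:
--                 result.append(sent)
--                 sent = []
--     sent_num = len(list(set(sent_ids)))
--     return result, sent_num
-- ===== SOURCE B (Python) =====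
-- def load_tsv(lines):
--     stripped = [l.rstrip('\n') for l in lines]
--     sent_num = len({l.split(':')[1] for l in stripped if l.startswith('#') and l[1] == 's'})
--     body = [l for l in stripped if not l.startswith('#')]
--     result = []
--     while '' in body:
--         k = body.index('')
--         result.append([l.split('\t') for l in body[:k]])
--         body = body[k + 1:]
--     return result, sent_num
-- ===== Notes on version B (the rewrite author's own statement) =====
-- stated objective: alternative
-- what changed: Replaces A's single stateful fold (three accumulators: result, current sentence, id list) by two independent passes: ids via a set comprehension over comment lines, and sentences by repeatedly slicing the comment-free line list at its first blank line, which also drops an unterminated trailing sentence without tracking it.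
import Mathlib
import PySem

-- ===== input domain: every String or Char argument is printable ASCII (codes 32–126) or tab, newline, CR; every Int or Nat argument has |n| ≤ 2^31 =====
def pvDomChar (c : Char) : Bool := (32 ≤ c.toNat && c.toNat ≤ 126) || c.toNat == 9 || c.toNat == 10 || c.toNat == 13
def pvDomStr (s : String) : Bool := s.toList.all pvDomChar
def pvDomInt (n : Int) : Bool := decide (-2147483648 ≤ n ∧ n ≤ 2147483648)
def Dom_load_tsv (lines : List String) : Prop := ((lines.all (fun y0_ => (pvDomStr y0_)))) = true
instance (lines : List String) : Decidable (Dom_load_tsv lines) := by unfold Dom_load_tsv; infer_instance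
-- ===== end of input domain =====

-- B replaces A's single stateful fold by two independent passes (ids by comprehension,
-- sentences by slicing the comment-free lines at blank lines); objective: alternative.

-- shared helpers: exact ports of str.rstrip('\n') (drop all trailing '\n') and line.split('\t')
def pvRstripNl (cs : List Char) : List Char :=
  (cs.reverse.dropWhile (fun c => c == '\n')).reverse

def pvTok (cs : List Char) : List String :=
  (PySem.Chars.splitOn cs ['\t']).map String.ofList

-- ===== PORT A =====
-- the body of A's for-loop, state (result, sent, sent_ids)
def pvStepA (st : List (List (List String)) × List (List String) × List (List Char))
    (line : String) : List (List (List String)) × List (List String) × List (List Char) :=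
  let cs := pvRstripNl line.toList
  if PySem.Chars.startswith cs ['#'] then
    if PySem.List.pyGet? cs 1 == some 's' then
      (st.1, st.2.1, st.2.2 ++ [PySem.List.pyGetD (PySem.Chars.splitOn cs [':']) 1 []])
    else st
  else
    if cs ≠ [] then
      (st.1, st.2.1 ++ [pvTok cs], st.2.2)
    else
      (st.1 ++ [st.2.1], [], st.2.2)

def load_tsv (lines : List String) : List (List (List String)) × Int :=
  let st := lines.foldl pvStepA ([], [], [])
  (st.1, ((PySem.Set.ofList st.2.2).length : Int))

-- ===== PORT B =====
-- the while-loop of B: repeatedly cut body at its first blank line ('' in / .index('') / slices)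
def pvSplitBody (body : List (List Char)) : List (List (List String)) :=
  if h : ([] : List Char) ∈ body then
    let k := body.idxOf ([] : List Char)
    (body.take k).map pvTok :: pvSplitBody (body.drop (k + 1))
  else []
termination_by body.length
decreasing_by
  have : body ≠ [] := by rintro rfl; simp at h
  simp only [List.length_drop]
  have : 0 < body.length := List.length_pos_iff.mpr this
  omega

def load_tsv_alt (lines : List String) : List (List (List String)) × Int :=
  let stripped := lines.map (fun l => pvRstripNl l.toList)
  let ids := (stripped.filter (fun cs =>
      PySem.Chars.startswith cs ['#'] && (PySem.List.pyGet? cs 1 == some 's'))).map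
      (fun cs => PySem.List.pyGetD (PySem.Chars.splitOn cs [':']) 1 [])
  let sentNum := ((PySem.Set.ofList ids).length : Int)
  let body := stripped.filter (fun cs => !PySem.Chars.startswith cs ['#'])
  (pvSplitBody body, sentNum)

-- ===== PRECONDITION & SPEC =====
-- Pre_ excludes exactly the inputs on which Python A raises IndexError: a comment line that
-- is just '#' (line[1]) or a '#s…' comment without a ':' (split(':')[1]); B raises there too.
def Pre_load_tsv (lines : List String) : Prop :=
  (lines.all (fun l =>
    match pvRstripNl l.toList with
    | '#' :: rest => !rest.isEmpty && (!(rest.head? == some 's') || rest.contains ':')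
    | _ => true)) = true

instance (lines : List String) : Decidable (Pre_load_tsv lines) := by
  unfold Pre_load_tsv; infer_instance

def pvWitness_load_tsv : List String := ["#s:1\n", "a\tb", "", "#s:2", "c", ""]

def Spec_load_tsv (lines : List String) (out : List (List (List String)) × Int) : Prop := out = load_tsv_alt lines
instance (lines : List String) (out : List (List (List String)) × Int) : Decidable (Spec_load_tsv lines out) := by unfold Spec_load_tsv; infer_instance

-- ===== CLAIM (what is proved, stated in full; the proofs are below) =====
def Claim_equal_load_tsv : Prop := ∀ (lines : List String), Dom_load_tsv lines → Pre_load_tsv lines → Spec_load_tsv lines (load_tsv lines)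

-- ===== LEMMAS AND PROOFS =====

-- proof-only: the grouping A's fold performs on the comment-free stripped lines
def pvGroups (s : List (List String)) : List (List Char) → List (List (List String))
  | [] => []
  | cs :: rest => if cs ≠ [] then pvGroups (s ++ [pvTok cs]) rest else s :: pvGroups [] rest

theorem pvStepA_ids (lines : List String)
    (st : List (List (List String)) × List (List String) × List (List Char)) :
    (lines.foldl pvStepA st).2.2 =
      st.2.2 ++ ((lines.map (fun l => pvRstripNl l.toList)).filter (fun cs =>
        PySem.Chars.startswith cs ['#'] && (PySem.List.pyGet? cs 1 == some 's'))).map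
        (fun cs => PySem.List.pyGetD (PySem.Chars.splitOn cs [':']) 1 []) := by
  induction lines generalizing st with
  | nil => simp
  | cons l rest ih =>
    simp only [List.foldl_cons, List.map_cons, List.filter_cons, ih]
    by_cases h1 : PySem.Chars.startswith (pvRstripNl l.toList) ['#'] = true <;>
      by_cases h2 : (PySem.List.pyGet? (pvRstripNl l.toList) 1 == some 's') = true <;>
        simp [pvStepA, h1, h2] <;> split_ifs <;> simp

theorem pvStepA_result (lines : List String) (r : List (List (List String)))
    (s : List (List String)) (ids : List (List Char)) :
    (lines.foldl pvStepA (r, s, ids)).1 =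
      r ++ pvGroups s ((lines.map (fun l => pvRstripNl l.toList)).filter
        (fun cs => !PySem.Chars.startswith cs ['#'])) := by
  induction lines generalizing r s ids with
  | nil => simp [pvGroups]
  | cons l rest ih =>
    simp only [List.foldl_cons, List.map_cons, List.filter_cons]
    by_cases h1 : PySem.Chars.startswith (pvRstripNl l.toList) ['#'] = true
    · by_cases h2 : (PySem.List.pyGet? (pvRstripNl l.toList) 1 == some 's') = true <;>
        simp [pvStepA, h1, h2, ih]
    · have hsw : PySem.Chars.startswith ([] : List Char) ['#'] = false := by decide
      by_cases h3 : pvRstripNl l.toList = []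
      · simp [pvStepA, h3, ih, pvGroups, hsw]
      · simp [pvStepA, h1, h3, ih, pvGroups]

theorem pvGroups_not_mem (body : List (List Char)) (s : List (List String))
    (h : ([] : List Char) ∉ body) : pvGroups s body = [] := by
  induction body generalizing s with
  | nil => rfl
  | cons cs rest ih =>
    simp only [List.mem_cons, not_or] at h
    simp [pvGroups, Ne.symm h.1, ih _ h.2]

theorem pvGroups_mem (body : List (List Char)) (s : List (List String))
    (h : ([] : List Char) ∈ body) :
    pvGroups s body =
      (s ++ (body.take (body.idxOf [])).map pvTok) :: pvGroups [] (body.drop (body.idxOf [] + 1)) := by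
  induction body generalizing s with
  | nil => simp at h
  | cons cs rest ih =>
    by_cases h3 : cs = []
    · subst h3
      simp [pvGroups, List.idxOf_cons_self]
    · have hmem : ([] : List Char) ∈ rest := by
        rcases List.mem_cons.mp h with h' | h'
        · exact absurd h'.symm h3
        · exact h'
      have hidx : (cs :: rest).idxOf ([] : List Char) = rest.idxOf ([] : List Char) + 1 := by
        rw [List.idxOf_cons_ne _ (by simpa using h3)]
      simp only [pvGroups, if_pos h3, hidx, List.take_succ_cons, List.drop_succ_cons,
        List.map_cons, ih _ hmem, List.append_assoc, List.cons_append, List.nil_append]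

theorem pvSplitBody_eq_groups (body : List (List Char)) :
    pvSplitBody body = pvGroups [] body := by
  fun_induction pvSplitBody body with
  | case1 body h k ih =>
    rw [pvGroups_mem body [] h]
    simp [k, ih]
  | case2 body h =>
    rw [pvGroups_not_mem body [] h]

-- ===== VERDICT (by name: the statement is the Claim_ definition above) =====
theorem load_tsv_spec : Claim_equal_load_tsv := by
  intro lines _ _
  unfold Spec_load_tsv load_tsv load_tsv_alt
  refine Prod.ext ?_ ?_
  · simpa [pvSplitBody_eq_groups] using pvStepA_result lines [] [] []
  · simpa using congrArg (fun l => ((PySem.Set.ofList l).length : Int)) (pvStepA_ids lines ([], [], []))
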